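-- pv_equiv track=rewrite | github.com/JerryYK/MTH325 | colorings.py | is_proper_edge
-- ===== SOURCE A (Python) =====
-- def is_proper_edge(graph):
--     for vertex in graph:
--         colors_used = []
--         for edges in graph[vertex]:
--             if edges[1] in colors_used:
--                 return False
--             else:
--                 colors_used.append(edges[1])
--     return True
-- ===== SOURCE B (Python) =====
-- def is_proper_edge(graph):
--     for vertex in graph:
--         colors = [e[1] for e in graph[vertex]]
--         if len(colors) != len(set(colors)):
--             return False
--     return True
-- ===== Notes on version B (the rewrite author's own statement) =====
-- stated objective: idiomatic
-- what changed: The incremental membership scan with early inner exit is replaced by building the per-vertex color list and comparing its length with the cardinality of its set in one shot.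
import Mathlib
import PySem

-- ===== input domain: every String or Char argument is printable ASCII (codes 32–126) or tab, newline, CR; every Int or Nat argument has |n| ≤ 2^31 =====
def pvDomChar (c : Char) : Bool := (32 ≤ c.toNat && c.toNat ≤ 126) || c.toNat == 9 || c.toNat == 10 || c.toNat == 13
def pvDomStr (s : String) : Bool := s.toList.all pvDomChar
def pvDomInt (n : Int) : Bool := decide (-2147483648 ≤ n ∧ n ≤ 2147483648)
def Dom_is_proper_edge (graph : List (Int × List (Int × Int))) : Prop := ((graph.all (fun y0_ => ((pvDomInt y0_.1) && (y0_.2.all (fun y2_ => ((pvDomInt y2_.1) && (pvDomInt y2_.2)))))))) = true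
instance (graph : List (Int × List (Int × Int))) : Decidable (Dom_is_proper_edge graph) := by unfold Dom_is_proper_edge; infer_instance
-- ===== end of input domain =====

-- B replaces A's incremental duplicate scan (early inner return on first repeated color)
-- by a build-then-compare pass: collect the vertex's colors, compare list length with set cardinality.

-- ===== PORT A =====
-- inner loop: for edges in graph[vertex]: if edges[1] in colors_used: return False else append
def pvAVertex : List (Int × Int) → List Int → Bool
  | [], _ => true
  | e :: rest, colors_used =>
      if colors_used.contains e.2 then false
      else pvAVertex rest (colors_used ++ [e.2])

-- outer loop: for vertex in graph (dict key iteration), looking up graph[vertex]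
def pvALoop (d : PySem.Dict Int (List (Int × Int))) : List Int → Bool
  | [] => true
  | v :: vs => if pvAVertex (d.getD v []) [] then pvALoop d vs else false

def is_proper_edge (graph : List (Int × List (Int × Int))) : Bool :=
  pvALoop ⟨graph⟩ (PySem.Dict.keys ⟨graph⟩)

-- ===== PORT B =====
def is_proper_edge_alt (graph : List (Int × List (Int × Int))) : Bool :=
  (PySem.Dict.keys (⟨graph⟩ : PySem.Dict Int (List (Int × Int)))).all (fun v =>
    let colors := ((PySem.Dict.getD (⟨graph⟩ : PySem.Dict Int (List (Int × Int))) v []).map Prod.snd)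
    (PySem.Set.ofList colors).length == colors.length)

-- ===== PRECONDITION & SPEC =====
def Spec_is_proper_edge (graph : List (Int × List (Int × Int))) (out : Bool) : Prop := out = is_proper_edge_alt graph
instance (graph : List (Int × List (Int × Int))) (out : Bool) : Decidable (Spec_is_proper_edge graph out) := by unfold Spec_is_proper_edge; infer_instance

-- ===== CLAIM (what is proved, stated in full; the proofs are below) =====
def Claim_equal_is_proper_edge : Prop := ∀ (graph : List (Int × List (Int × Int))), Dom_is_proper_edge graph → Spec_is_proper_edge graph (is_proper_edge graph)

-- ===== LEMMAS AND PROOFS =====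

-- set(xs) keeps the first occurrences as a sublist of xs
theorem pv_ofList_sublist (xs : List Int) : List.Sublist (PySem.Set.ofList xs) xs := by
  induction xs with
  | nil => simp [PySem.Set.ofList_nil]
  | cons x xs ih =>
    rw [PySem.Set.ofList_cons]
    exact List.Sublist.cons₂ x (List.Sublist.trans List.filter_sublist ih)

-- len(set(xs)) == len(xs) decides Nodup
theorem pv_len_ofList_iff (xs : List Int) :
    ((PySem.Set.ofList xs).length == xs.length) = decide xs.Nodup := by
  by_cases h : xs.Nodup
  · rw [PySem.Set.ofList_eq_self_of_nodup xs h]; simp [h]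
  · simp [h]
    intro hlen
    exact h (((pv_ofList_sublist xs).eq_of_length hlen) ▸ PySem.Set.nodup_ofList xs)

-- A's incremental scan decides Nodup of the accumulated colors
theorem pvAVertex_eq (edges : List (Int × Int)) (acc : List Int) (hacc : acc.Nodup) :
    pvAVertex edges acc = decide ((acc ++ edges.map Prod.snd).Nodup) := by
  induction edges generalizing acc with
  | nil => simp [pvAVertex, hacc]
  | cons e rest ih =>
    by_cases hm : e.2 ∈ acc
    · have hnot : ¬ (acc ++ e.2 :: List.map Prod.snd rest).Nodup := by
        intro h
        exact (List.nodup_append.mp h).2.2 e.2 hm e.2 List.mem_cons_self rfl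
      simp [pvAVertex, hm, hnot]
    · have hn : (acc ++ [e.2]).Nodup := by
        rw [List.nodup_append]
        exact ⟨hacc, List.nodup_singleton _, fun a ha b hb hab => hm (by simp at hb; exact (hab.trans hb) ▸ ha)⟩
      simp only [pvAVertex, List.contains_eq_mem, hm, decide_false, Bool.false_eq_true,
        if_false, ih (acc ++ [e.2]) hn, List.map_cons]
      congr 1
      simp [List.append_assoc]

theorem pvALoop_eq (d : PySem.Dict Int (List (Int × Int))) (ks : List Int) :
    pvALoop d ks = ks.all (fun v =>
      let colors := ((d.getD v []).map Prod.snd)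
      (PySem.Set.ofList colors).length == colors.length) := by
  induction ks with
  | nil => rfl
  | cons v vs ih =>
    simp only [pvALoop, List.all_cons, ih]
    rw [pvAVertex_eq _ [] List.nodup_nil, pv_len_ofList_iff]
    by_cases h : ((d.getD v []).map Prod.snd).Nodup <;> simp [h]

-- ===== VERDICT (by name: the statement is the Claim_ definition above) =====
theorem is_proper_edge_spec : Claim_equal_is_proper_edge := by
  intro graph _
  unfold Spec_is_proper_edge is_proper_edge is_proper_edge_alt
  exact pvALoop_eq _ _
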